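-- pv_equiv track=rewrite | github.com/riscmkv/PatchNotestBot | patchnotes-bot.py | gen_message
-- ===== SOURCE A (Python) =====
-- def gen_message(n_changes, char_limit=280, sw_name=None):
--     if sw_name:
--         message = "Changes added in latest " + sw_name + " update:\n"
--     else:
--         message = "Changes added in latest update:\n"
--
--     for n in range(len(n_changes)):
--         potential_addition = " - " + n_changes[n] + '\n'
--         if len(message) + len(potential_addition) >= char_limit:
--             break
--         else:
--             message = message + potential_addition
--
--     return message
-- ===== SOURCE B (Python) =====
-- def gen_message(n_changes, char_limit=280, sw_name=None):
--     if sw_name: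
--         base = "Changes added in latest " + sw_name + " update:\n"
--     else:
--         base = "Changes added in latest update:\n"
--     adds = [" - " + c + "\n" for c in n_changes]
--     cums = []
--     total = len(base)
--     for a in adds:
--         total += len(a)
--         cums.append(total)
--     cut = next((i for i, t in enumerate(cums) if t >= char_limit), len(adds))
--     return base + "".join(adds[:cut])
-- ===== Notes on version B (the rewrite author's own statement) =====
-- stated objective: alternative
-- what changed: B precomputes all addition strings and their cumulative message lengths in one pass, finds the cutoff index as the first cumulative length reaching char_limit, and joins the selected prefix once, instead of A's incremental string concatenation with an early break.
import Mathlib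
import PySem

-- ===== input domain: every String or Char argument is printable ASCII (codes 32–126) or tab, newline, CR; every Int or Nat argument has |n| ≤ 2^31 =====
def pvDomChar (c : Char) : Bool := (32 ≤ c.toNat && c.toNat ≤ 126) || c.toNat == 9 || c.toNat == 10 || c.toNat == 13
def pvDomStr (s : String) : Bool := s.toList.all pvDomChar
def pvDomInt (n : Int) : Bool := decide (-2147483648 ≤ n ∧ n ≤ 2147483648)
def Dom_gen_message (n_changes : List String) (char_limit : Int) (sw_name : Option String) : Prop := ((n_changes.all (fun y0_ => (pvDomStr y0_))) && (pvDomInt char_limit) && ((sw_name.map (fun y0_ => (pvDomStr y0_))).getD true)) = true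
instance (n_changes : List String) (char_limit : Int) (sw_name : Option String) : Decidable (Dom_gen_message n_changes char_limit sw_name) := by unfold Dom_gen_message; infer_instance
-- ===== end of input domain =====

-- B computes the addition strings and their cumulative message lengths first, finds the
-- cutoff index, and joins once; A concatenates incrementally with a break. Same value everywhere.

-- ===== PORT A =====
-- the for-loop of A: message accumulator, break when the limit is reached
def genMsgLoopA (char_limit : Int) (msg : List Char) : List String → List Char
  | [] => msg
  | c :: rest =>
    let add := (" - ").toList ++ c.toList ++ ['\n']
    if char_limit ≤ (msg.length : Int) + (add.length : Int) then msg
    else genMsgLoopA char_limit (msg ++ add) rest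

def gen_message (n_changes : List String) (char_limit : Int) (sw_name : Option String) : String :=
  let message : List Char :=
    match sw_name with
    | some s => if s.toList = [] then ("Changes added in latest update:\n").toList
                else ("Changes added in latest ").toList ++ s.toList ++ (" update:\n").toList
    | none => ("Changes added in latest update:\n").toList
  String.ofList (genMsgLoopA char_limit message n_changes)

-- ===== PORT B =====
def gen_message_alt (n_changes : List String) (char_limit : Int) (sw_name : Option String) : String :=
  let base : List Char :=
    match sw_name with
    | some s => if s.toList = [] then ("Changes added in latest update:\n").toList
                else ("Changes added in latest ").toList ++ s.toList ++ (" update:\n").toList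
    | none => ("Changes added in latest update:\n").toList
  let adds : List (List Char) := n_changes.map (fun c => (" - ").toList ++ c.toList ++ ['\n'])
  -- running-sum loop building the cumulative lengths (two accumulators: total, cums)
  let cums : List Int :=
    (adds.foldl (fun (st : Int × List Int) a => (st.1 + (a.length : Int), st.2 ++ [st.1 + (a.length : Int)]))
      ((base.length : Int), [])).2
  let cut : Nat := (cums.findIdx? (fun t => char_limit ≤ t)).getD adds.length
  String.ofList (base ++ (adds.take cut).flatten)

-- ===== PRECONDITION & SPEC =====
def Spec_gen_message (n_changes : List String) (char_limit : Int) (sw_name : Option String) (out : String) : Prop := out = gen_message_alt n_changes char_limit sw_name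
instance (n_changes : List String) (char_limit : Int) (sw_name : Option String) (out : String) : Decidable (Spec_gen_message n_changes char_limit sw_name out) := by unfold Spec_gen_message; infer_instance

-- ===== CLAIM (what is proved, stated in full; the proofs are below) =====
def Claim_equal_gen_message : Prop := ∀ (n_changes : List String) (char_limit : Int) (sw_name : Option String), Dom_gen_message n_changes char_limit sw_name → Spec_gen_message n_changes char_limit sw_name (gen_message n_changes char_limit sw_name)

-- ===== LEMMAS AND PROOFS =====

-- reference cutoff: number of additions A keeps, given limit and current length
def cutRec (char_limit : Int) (t : Int) : List (List Char) → Nat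
  | [] => 0
  | a :: rest => if char_limit ≤ t + (a.length : Int) then 0 else cutRec char_limit (t + a.length) rest + 1

-- cumulative lengths as a recursive list
def cumsOf (t : Int) : List (List Char) → List Int
  | [] => []
  | a :: rest => (t + (a.length : Int)) :: cumsOf (t + a.length) rest

theorem foldl_cums (adds : List (List Char)) : ∀ (t : Int) (acc : List Int),
    (adds.foldl (fun (st : Int × List Int) a => (st.1 + (a.length : Int), st.2 ++ [st.1 + (a.length : Int)])) (t, acc)).2
      = acc ++ cumsOf t adds := by
  induction adds with
  | nil => intro t acc; simp [cumsOf]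
  | cons a rest ih =>
    intro t acc
    simp only [List.foldl_cons, cumsOf]
    rw [ih]
    simp

theorem findIdx_cums (char_limit : Int) (adds : List (List Char)) : ∀ (t : Int),
    ((cumsOf t adds).findIdx? (fun u => char_limit ≤ u)).getD adds.length = cutRec char_limit t adds := by
  induction adds with
  | nil => intro t; simp [cumsOf, cutRec]
  | cons a rest ih =>
    intro t
    simp only [cumsOf, cutRec, List.findIdx?_cons]
    by_cases h : char_limit ≤ t + (a.length : Int)
    · simp [h]
    · simp only [h, if_false, decide_eq_true_eq]
      rw [← ih (t + a.length)]
      cases hfi : (cumsOf (t + (a.length : Int)) rest).findIdx? (fun u => char_limit ≤ u) with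
      | none => simp
      | some i => simp

theorem loopA_eq (char_limit : Int) (l : List String) : ∀ (msg : List Char),
    genMsgLoopA char_limit msg l
      = msg ++ ((l.map (fun c => (" - ").toList ++ c.toList ++ ['\n'])).take
          (cutRec char_limit (msg.length : Int) (l.map (fun c => (" - ").toList ++ c.toList ++ ['\n'])))).flatten := by
  induction l with
  | nil => intro msg; simp [genMsgLoopA, cutRec]
  | cons c rest ih =>
    intro msg
    simp only [genMsgLoopA, List.map_cons, cutRec]
    split_ifs with h
    · simp
    · rw [ih]
      simp only [List.take_succ_cons, List.flatten_cons]
      rw [List.append_assoc]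
      congr 2
      push_cast [List.length_append]
      ring_nf

-- ===== VERDICT (by name: the statement is the Claim_ definition above) =====
theorem gen_message_spec : Claim_equal_gen_message := by
  intro n_changes char_limit sw_name _
  simp only [Spec_gen_message, gen_message, gen_message_alt, foldl_cums, findIdx_cums, loopA_eq,
    List.nil_append]
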